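-- pv_equiv track=rewrite | github.com/satyanarayan-rao/dSMF_for_SMThub | scripts/utils.py | get_border_methylated_cytosines
-- ===== SOURCE A (Python) =====
-- def get_border_methylated_cytosines (m_vec):
--     """
--     take the methylation vector and reports the first methylated loci from both ends
--     returns None when no methylated cytosines are found
--     """
--     len_vec = len(m_vec)
--     left_border = None
--     right_border = None
--     cnt = 0
--     for c in m_vec:
--         if (c==".") or (c == c.lower()):
--             cnt+=1
--         elif c == c.upper():
--             break
--     left_border = cnt # point at the capital letter in python index scheme
--     cnt = 0
--     for c in m_vec[::-1]:
--         if (c==".") or (c == c.lower()):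
--             cnt+=1
--         elif c == c.upper():
--             break
--     right_border = len_vec - cnt - 1 # point at the capital letter in python index scheme
--
--     if left_border == len_vec:
--         left_border = None
--         right_border = None
--     return left_border, right_border
-- ===== SOURCE B (Python) =====
-- def get_border_methylated_cytosines(m_vec):
--     pos = [i for i, c in enumerate(m_vec) if c != "." and c == c.upper() and c != c.lower()]
--     if not pos:
--         return None, None
--     return pos[0], pos[-1]
-- ===== Notes on version B (the rewrite author's own statement) =====
-- stated objective: simpler
-- what changed: Replaced A's two separate end-scans (a forward break-loop and a second break-loop over the reversed string, plus length arithmetic) by a single forward pass that collects all methylated indices and returns the first and last.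
import Mathlib
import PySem

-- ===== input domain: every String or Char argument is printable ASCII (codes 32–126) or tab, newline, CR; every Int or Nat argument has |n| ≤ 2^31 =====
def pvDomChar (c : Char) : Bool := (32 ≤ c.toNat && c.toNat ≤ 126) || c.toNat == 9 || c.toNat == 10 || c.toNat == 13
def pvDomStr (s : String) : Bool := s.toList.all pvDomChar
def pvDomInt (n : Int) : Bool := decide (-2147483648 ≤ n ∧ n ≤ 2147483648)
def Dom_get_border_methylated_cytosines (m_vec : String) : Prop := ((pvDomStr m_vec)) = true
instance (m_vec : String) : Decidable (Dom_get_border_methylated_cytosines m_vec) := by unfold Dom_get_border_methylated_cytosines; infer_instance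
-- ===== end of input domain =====

-- B replaces A's two separate end-scans by one forward pass collecting all methylated
-- indices and reading off the first and last (objective: simpler).

-- ===== PORT A =====
-- the counting loop A runs from each end ('for c in …: if (c==".") or (c==c.lower()): cnt+=1 elif c==c.upper(): break')
def pvALoop : List Char → Int → Int
  | [], cnt => cnt
  | c :: rest, cnt =>
    if c == '.' || c == PySem.Chars.lowerChar c then pvALoop rest (cnt + 1)
    else if c == PySem.Chars.upperChar c then cnt
    else pvALoop rest cnt

def get_border_methylated_cytosines (m_vec : String) : Option Int × Option Int :=
  let l := m_vec.toList
  let len_vec : Int := l.length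
  let left_border := pvALoop l 0
  let cnt := pvALoop l.reverse 0      -- m_vec[::-1] (PySem.List.slice?_none_none_neg_one: [::-1] is reverse)
  let right_border := len_vec - cnt - 1
  if left_border == len_vec then (none, none) else (some left_border, some right_border)

-- ===== PORT B =====
-- the comprehension's predicate, verbatim
def pvMeth (c : Char) : Bool := c != '.' && c == PySem.Chars.upperChar c && c != PySem.Chars.lowerChar c

def get_border_methylated_cytosines_alt (m_vec : String) : Option Int × Option Int :=
  let pos := (PySem.List.enumerate m_vec.toList 0).filterMap
    (fun p => if pvMeth p.2 then some p.1 else none)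
  if pos.isEmpty then (none, none)
  else (pos.head?, pos.getLast?)

-- ===== PRECONDITION & SPEC =====
def Spec_get_border_methylated_cytosines (m_vec : String) (out : Option Int × Option Int) : Prop := out = get_border_methylated_cytosines_alt m_vec
instance (m_vec : String) (out : Option Int × Option Int) : Decidable (Spec_get_border_methylated_cytosines m_vec out) := by unfold Spec_get_border_methylated_cytosines; infer_instance

-- ===== CLAIM (what is proved, stated in full; the proofs are below) =====
def Claim_equal_get_border_methylated_cytosines : Prop := ∀ (m_vec : String), Dom_get_border_methylated_cytosines m_vec → Spec_get_border_methylated_cytosines m_vec (get_border_methylated_cytosines m_vec)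

-- ===== LEMMAS AND PROOFS =====

-- A's first branch condition is exactly the negation of B's predicate (checked by
-- enumeration below 128; PySem's case mapping is the identity above 'z')
theorem pvMeth_branch_small : ∀ n < 128, ((Char.ofNat n == '.' || Char.ofNat n == PySem.Chars.lowerChar (Char.ofNat n)) = !pvMeth (Char.ofNat n)) := by decide

theorem pvMeth_branch (c : Char) : (c == '.' || c == PySem.Chars.lowerChar c) = !pvMeth c := by
  by_cases h : c.toNat < 128
  · have := pvMeth_branch_small c.toNat h
    rwa [Char.ofNat_toNat] at this
  · have hv : c.val.toNat = c.toNat := rfl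
    have hz : ¬ (c ≤ 'Z') := by
      intro hle
      rw [Char.le_def, UInt32.le_iff_toNat_le] at hle
      have h90 : ('Z' : Char).val.toNat = 90 := by decide
      omega
    have hz' : ¬ (c ≤ 'z') := by
      intro hle
      rw [Char.le_def, UInt32.le_iff_toNat_le] at hle
      have h122 : ('z' : Char).val.toNat = 122 := by decide
      omega
    have h1 : PySem.Chars.isupper c = false := by simp [PySem.Chars.isupper, hz]
    have h2 : PySem.Chars.islower c = false := by simp [PySem.Chars.islower, hz']
    have e1 : PySem.Chars.lowerChar c = c := by
      simp only [PySem.Chars.lowerChar, h1, Bool.false_eq_true, if_false]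
    have e2 : PySem.Chars.upperChar c = c := by
      simp only [PySem.Chars.upperChar, h2, Bool.false_eq_true, if_false]
    simp only [pvMeth, e1, e2, beq_self_eq_true, Bool.or_true, bne_self_eq_false,
      Bool.and_false, Bool.not_false]

theorem pvMeth_break {c : Char} (h : pvMeth c = true) : (c == PySem.Chars.upperChar c) = true := by
  simp only [pvMeth, Bool.and_eq_true, bne_iff_ne, beq_iff_eq] at h
  simpa using h.1.2

-- the A-loop counts the prefix of non-methylated characters
theorem pvALoop_eq (l : List Char) (cnt : Int) :
    pvALoop l cnt = cnt + ((l.takeWhile (fun c => !pvMeth c)).length : Int) := by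
  induction l generalizing cnt with
  | nil => simp [pvALoop]
  | cons c rest ih =>
    rw [pvALoop, pvMeth_branch]
    by_cases h : pvMeth c
    · simp [h, pvMeth_break h]
    · rw [if_pos (by simp [h]), ih]
      simp [h]
      omega

-- B's position list, with an arbitrary enumeration start
def pvPos (l : List Char) (s : Int) : List Int :=
  (PySem.List.enumerate l s).filterMap (fun p => if pvMeth p.2 then some p.1 else none)

theorem pvPos_cons (c : Char) (l : List Char) (s : Int) :
    pvPos (c :: l) s = (if pvMeth c then [s] else []) ++ pvPos l (s + 1) := by
  by_cases h : pvMeth c <;> simp [pvPos, PySem.List.enumerate_cons, h]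

theorem pvPos_head (l : List Char) (s : Int) :
    (pvPos l s).head? = if l.any pvMeth then some (s + ((l.takeWhile (fun c => !pvMeth c)).length : Int)) else none := by
  induction l generalizing s with
  | nil => simp [pvPos, PySem.List.enumerate]
  | cons c rest ih =>
    rw [pvPos_cons]
    by_cases h : pvMeth c
    · simp [h]
    · have hpre : (if pvMeth c then [s] else []) = ([] : List Int) := by simp [h]
      rw [hpre, List.nil_append, ih]
      by_cases h2 : rest.any pvMeth
      · simp only [h2, if_true, List.any_cons, Bool.false_or, List.takeWhile_cons, h,
          Bool.not_false, List.length_cons]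
        congr 1
        push_cast
        omega
      · simp [h, h2]

theorem pvPos_eq_nil (l : List Char) (s : Int) :
    pvPos l s = [] ↔ l.any pvMeth = false := by
  rw [← List.head?_eq_none_iff, pvPos_head]
  by_cases h : l.any pvMeth <;> simp [h]

-- a methylated char makes the non-methylated prefix strictly shorter than the list
theorem pvTakeWhile_lt {l : List Char} (h : l.any pvMeth = true) :
    (l.takeWhile (fun c => !pvMeth c)).length < l.length := by
  rcases Nat.lt_or_ge (l.takeWhile (fun c => !pvMeth c)).length l.length with h1 | h1
  · exact h1
  · exfalso
    have hself : l.takeWhile (fun c => !pvMeth c) = l :=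
      (List.takeWhile_sublist _).eq_of_length_le h1
    rw [List.takeWhile_eq_self_iff] at hself
    simp only [List.any_eq_true] at h
    obtain ⟨x, hx, hmx⟩ := h
    have := hself x hx
    simp [hmx] at this

theorem pvPos_last (l : List Char) (s : Int) :
    (pvPos l s).getLast? = if l.any pvMeth then some (s + (l.length : Int) - 1 - ((l.reverse.takeWhile (fun c => !pvMeth c)).length : Int)) else none := by
  induction l generalizing s with
  | nil => simp [pvPos, PySem.List.enumerate]
  | cons c rest ih =>
    rw [pvPos_cons]
    by_cases hr : rest.any pvMeth
    · -- the tail contains a methylated char: the last position comes from the tail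
      have hne : pvPos rest (s + 1) ≠ [] := by
        intro hx; rw [pvPos_eq_nil] at hx; simp [hx] at hr
      have hlt := pvTakeWhile_lt (l := rest.reverse) (by simpa using hr)
      have htw : (c :: rest).reverse.takeWhile (fun c => !pvMeth c) = rest.reverse.takeWhile (fun c => !pvMeth c) := by
        rw [List.reverse_cons, List.takeWhile_append, if_neg (by simp at hlt ⊢; omega)]
      rw [List.getLast?_append_of_ne_nil _ hne, ih, htw]
      simp only [hr, if_true, List.any_cons, Bool.or_eq_true, or_true, List.length_cons]
      congr 1
      push_cast
      omega
    · -- no methylated char in the tail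
      have hnil : pvPos rest (s + 1) = [] := (pvPos_eq_nil rest (s + 1)).2 (by simpa using hr)
      rw [hnil, List.append_nil]
      by_cases hc : pvMeth c
      · have hr' : rest.any pvMeth = false := by simpa using hr
        have hall : rest.reverse.takeWhile (fun c => !pvMeth c) = rest.reverse := by
          rw [List.takeWhile_eq_self_iff]
          intro x hx
          rw [List.any_eq_false] at hr'
          simp [hr' x (by simpa using hx)]
        have htw : (c :: rest).reverse.takeWhile (fun c => !pvMeth c) = rest.reverse := by
          rw [List.reverse_cons, List.takeWhile_append, if_pos (by rw [hall])]
          simp [hc]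
        rw [htw]
        simp only [List.any_cons, hc, Bool.true_or, if_true,
          List.getLast?_singleton, List.length_cons, List.length_reverse]
        congr 1
        push_cast
        omega
      · simp [hc, hr, List.any_cons]

-- ===== VERDICT (by name: the statement is the Claim_ definition above) =====
theorem get_border_methylated_cytosines_spec : Claim_equal_get_border_methylated_cytosines := by
  intro m_vec _
  unfold Spec_get_border_methylated_cytosines get_border_methylated_cytosines get_border_methylated_cytosines_alt
  set l := m_vec.toList with hl
  simp only [pvALoop_eq]
  have hpos : (PySem.List.enumerate l 0).filterMap (fun p => if pvMeth p.2 then some p.1 else none) = pvPos l 0 := rfl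
  rw [hpos]
  by_cases h : l.any pvMeth
  · have hne : pvPos l 0 ≠ [] := by
      intro hx; rw [pvPos_eq_nil] at hx; simp [hx] at h
    have hlt := pvTakeWhile_lt h
    have hne2 : ¬ ((0 : Int) + ((l.takeWhile (fun c => !pvMeth c)).length : Int) = (l.length : Int)) := by
      omega
    rw [if_neg (by simpa using hne2), if_neg (by simp [List.isEmpty_iff, hne])]
    rw [pvPos_head, pvPos_last, if_pos h, if_pos h]
    have hrev : (l.reverse.takeWhile (fun c => !pvMeth c)).length ≤ l.length := by
      have := (List.takeWhile_sublist (l := l.reverse) (fun c => !pvMeth c)).length_le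
      simpa using this
    simp only [Prod.mk.injEq, Option.some.injEq]
    constructor
    · trivial
    · ring
  · have hnil : pvPos l 0 = [] := (pvPos_eq_nil l 0).2 (by simpa using h)
    have hself : l.takeWhile (fun c => !pvMeth c) = l := by
      rw [List.takeWhile_eq_self_iff]
      intro x hx
      have h' : l.any pvMeth = false := by simpa using h
      simp only [List.any_eq_false] at h'
      simp [h' x hx]
    simp [hnil, hself]
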